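-- pv_equiv track=rewrite | github.com/AbhikKhan/MTP_IITG | Previous Work/findfpandseq2.py | rearrange_list
-- ===== SOURCE A (Python) =====
-- from collections import Counter
-- from itertools import chain
-- from collections import Counter
-- from itertools import chain
--
-- def rearrange_list(lst):
--     # Count the frequency of each element
--     counts = Counter(lst)
--
--     # Sort the elements based on their frequency in descending order
--     sorted_elements = sorted(lst, key=lambda x: counts[x], reverse=True)
--
--     # Create a list to store the rearranged elements
--     rearranged_list = []
--
--     # Group the elements based on their frequency
--     grouped_elements = [[k] * v for k, v in counts.items()]
--
--     # Find the maximum group length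
--     max_group_length = max(map(len, grouped_elements)) if grouped_elements else 0
--
--     # Helper function to check if a group has consecutive same elements
--     def has_consecutive_elements(group):
--         for i in range(len(group) - 1):
--             if group[i] == group[i+1]:
--                 return True
--         return False
--
--     # Iterate until all elements are processed
--     while grouped_elements:
--         # Sort the groups based on their length and check for consecutive same elements
--         grouped_elements.sort(key=len, reverse=True)
--
--         # Get the largest group
--         largest_group = grouped_elements[0]
--
--         # Check if the largest group has consecutive same elements
--         if has_consecutive_elements(largest_group):
--             # If so, take the first element from the largest group and move it to the end
--             element = largest_group.pop(0)
--             largest_group.append(element)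
--
--             # Sort the groups again
--             grouped_elements.sort(key=len, reverse=True)
--
--         # Remove and append elements from each group to the rearranged list
--         grouped_elements = [group for group in grouped_elements if group]
--         for i in range(len(grouped_elements)):
--             rearranged_list.append(grouped_elements[i].pop(0))
--
--     # Extend the rearranged list with remaining elements
--     rearranged_list.extend(chain.from_iterable(grouped_elements))
--
--     return rearranged_list
-- ===== SOURCE B (Python) =====
-- from collections import Counter
--
-- def rearrange_list(lst):
--     # Sort the distinct elements once by frequency (descending, stable on
--     # first occurrence), then emit round-robin rounds directly.
--     counts = Counter(lst)
--     groups = sorted(counts.items(), key=lambda kv: kv[1], reverse=True)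
--     out = []
--     max_count = groups[0][1] if groups else 0
--     for r in range(max_count):
--         for k, c in groups:
--             if c <= r:
--                 break
--             out.append(k)
--     return out
-- ===== Notes on version B (the rewrite author's own statement) =====
-- stated objective: faster
-- what changed: A re-sorts the list of groups (twice) and rebuilds it on every round of the while-loop; B counts once, sorts the distinct elements by frequency once, and emits the round-robin rounds directly from the sorted (element, count) pairs, breaking out of each round at the first exhausted count.
import Mathlib
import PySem

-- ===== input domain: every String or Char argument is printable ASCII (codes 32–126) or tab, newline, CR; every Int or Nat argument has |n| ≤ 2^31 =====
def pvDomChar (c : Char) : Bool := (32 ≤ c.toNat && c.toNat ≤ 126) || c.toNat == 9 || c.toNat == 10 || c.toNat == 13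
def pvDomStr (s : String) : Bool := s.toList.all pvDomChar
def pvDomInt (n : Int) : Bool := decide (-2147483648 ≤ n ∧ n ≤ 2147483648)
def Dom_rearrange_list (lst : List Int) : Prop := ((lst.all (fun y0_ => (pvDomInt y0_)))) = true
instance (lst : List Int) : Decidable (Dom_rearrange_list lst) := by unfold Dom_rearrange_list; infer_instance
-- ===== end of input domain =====

-- B replaces A's re-sort-every-round loop by one sort of the counted groups followed by
-- direct round-robin emission (objective: faster).


-- ===== PORT A =====

-- helper `has_consecutive_elements(group)`: any i in range(len(group)-1) with group[i] == group[i+1]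
-- (indices are always in range, so pyGetD's default is never read)
def hasConsecA (g : List Int) : Bool :=
  (PySem.List.pyRange 0 ((g.length : Int) - 1) 1).any
    (fun i => PySem.List.pyGetD g i 0 == PySem.List.pyGetD g (i + 1) 0)

-- `largest_group.pop(0); largest_group.append(element)` (guarded by hasConsecA, so g ≠ [];
-- the [] branch is unreachable)
def popAppendA (g : List Int) : List Int :=
  match g with
  | [] => []
  | e :: t => t ++ [e]

-- termination facts for the while-loop below (cited by name in its decreasing_by)
theorem pv_sum_filter_le {α : Type} (p : α → Bool) (f : α → Nat) :
    ∀ l : List α, ((l.filter p).map f).sum ≤ (l.map f).sum := by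
  intro l; induction l with
  | nil => simp
  | cons x t ih => by_cases h : p x <;> simp [h] <;> omega

theorem pv_sum_tail_nonempty :
    ∀ l : List (List Int), (∀ g ∈ l, g ≠ []) →
      ((l.map List.tail).map List.length).sum + l.length = (l.map List.length).sum := by
  intro l; induction l with
  | nil => simp
  | cons x t ih =>
    intro h
    have hx : x ≠ [] := h x (by simp)
    have := ih (fun g hg => h g (by simp [hg]))
    have hlen : x.tail.length + 1 = x.length := by
      cases x with | nil => exact absurd rfl hx | cons a b => simp
    simp only [List.map_cons, List.sum_cons, List.length_cons]
    omega

theorem pv_gs2_sum (gs : List (List Int)) (hne : gs ≠ []) :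
    ((if hasConsecA ((PySem.List.sorted gs (fun g => (g.length : Int)) true).headD []) then
        PySem.List.sorted
          (match PySem.List.sorted gs (fun g => (g.length : Int)) true with
            | [] => [] | g :: rest => popAppendA g :: rest)
          (fun g => (g.length : Int)) true
      else PySem.List.sorted gs (fun g => (g.length : Int)) true).map List.length).sum
      = (gs.map List.length).sum := by
  have hperm1 : (PySem.List.sorted gs (fun g => (g.length : Int)) true).Perm gs :=
    PySem.List.sorted_perm gs _ true
  have h1 : ((PySem.List.sorted gs (fun g => (g.length : Int)) true).map List.length).sum
      = (gs.map List.length).sum := (hperm1.map List.length).sum_eq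
  by_cases hc : hasConsecA ((PySem.List.sorted gs (fun g => (g.length : Int)) true).headD [])
  · rw [if_pos hc]
    cases hg1 : PySem.List.sorted gs (fun g => (g.length : Int)) true with
    | nil =>
      rw [hg1] at hperm1
      exact absurd hperm1.symm.eq_nil hne
    | cons g rest =>
      have hp : (PySem.List.sorted (popAppendA g :: rest) (fun g => (g.length : Int)) true).Perm
          (popAppendA g :: rest) := PySem.List.sorted_perm _ _ true
      rw [(hp.map List.length).sum_eq]
      have hpa : (popAppendA g).length = g.length := by cases g <;> simp [popAppendA]
      rw [← h1, hg1]
      simp [hpa]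
  · rw [if_neg hc]; exact h1

theorem pv_loopA_measure (gs gs2 : List (List Int)) (hne : gs ≠ [])
    (hsum : (gs2.map List.length).sum = (gs.map List.length).sum) :
    (((gs2.filter (fun g => !g.isEmpty)).map List.tail).map List.length).sum +
      ((gs2.filter (fun g => !g.isEmpty)).map List.tail).length
      < (gs.map List.length).sum + gs.length := by
  have h3 : ((gs2.filter (fun g => !g.isEmpty)).map List.length).sum ≤ (gs2.map List.length).sum :=
    pv_sum_filter_le _ _ _
  have h4 : ∀ g ∈ gs2.filter (fun g => !g.isEmpty), g ≠ [] := by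
    intro g hg
    rw [List.mem_filter] at hg
    simpa using hg.2
  have h5 := pv_sum_tail_nonempty _ h4
  have h6 : 0 < gs.length := List.length_pos_of_ne_nil hne
  rw [List.length_map]
  omega

-- the `while grouped_elements:` loop; on exit the Python extends with the flattened (empty) remainder
def loopA (gs : List (List Int)) (acc : List Int) : List Int :=
  if gs = [] then acc ++ gs.flatten
  else
    let gs1 := PySem.List.sorted gs (fun g => (g.length : Int)) true
    let largest := gs1.headD []
    let gs2 := if hasConsecA largest then
        PySem.List.sorted
          (match gs1 with | [] => [] | g :: rest => popAppendA g :: rest)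
          (fun g => (g.length : Int)) true
      else gs1
    let gs3 := gs2.filter (fun g => !g.isEmpty)
    loopA (gs3.map List.tail) (acc ++ gs3.map (fun g => g.headD 0))
termination_by (gs.map List.length).sum + gs.length
decreasing_by
  exact pv_loopA_measure gs _ (by assumption) (pv_gs2_sum gs (by assumption))

def rearrange_list (lst : List Int) : List Int :=
  let counts := PySem.Dict.counter lst
  let _sorted_elements := PySem.List.sorted lst (fun x => counts.getD x 0) true
  let grouped_elements := counts.items.map (fun p => PySem.List.pyRepeat [p.1] p.2)
  let _max_group_length : Int :=
    if grouped_elements ≠ [] then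
      ((grouped_elements.map (fun g => (g.length : Int))).max?).getD 0
    else 0
  loopA grouped_elements []

-- ===== PORT B =====

-- the inner `for k, c in groups: if c <= r: break; out.append(k)`
def emitRoundB (gs : List (Int × Int)) (r : Int) : List Int :=
  match gs with
  | [] => []
  | (k, c) :: rest => if c ≤ r then [] else k :: emitRoundB rest r

def rearrange_list_alt (lst : List Int) : List Int :=
  let counts := PySem.Dict.counter lst
  let groups := PySem.List.sorted counts.items (fun kv => kv.2) true
  let max_count := match groups with | [] => 0 | g :: _ => g.2
  (PySem.List.pyRange 0 max_count 1).foldl (fun out r => out ++ emitRoundB groups r) []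

-- ===== PRECONDITION & SPEC =====
def Spec_rearrange_list (lst : List Int) (out : List Int) : Prop := out = rearrange_list_alt lst
instance (lst : List Int) (out : List Int) : Decidable (Spec_rearrange_list lst out) := by unfold Spec_rearrange_list; infer_instance

-- ===== CLAIM (what is proved, stated in full; the proofs are below) =====
def Claim_equal_rearrange_list : Prop := ∀ (lst : List Int), Dom_rearrange_list lst → Spec_rearrange_list lst (rearrange_list lst)

-- ===== LEMMAS AND PROOFS =====

-- termination facts for the roundsR recursion below
theorem pv_sum_dec (ks : List (Int × Int)) :
    ((ks.filter (fun p => decide (0 < p.2))).map (fun p => (p.2 - 1).toNat)).sum +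
      (ks.filter (fun p => decide (0 < p.2))).length =
    ((ks.filter (fun p => decide (0 < p.2))).map (fun p => p.2.toNat)).sum := by
  induction ks with
  | nil => simp
  | cons x t ih =>
    by_cases h : (0 : Int) < x.2
    · have hf : List.filter (fun p => decide (0 < p.2)) (x :: t)
          = x :: List.filter (fun p => decide (0 < p.2)) t := by simp [h]
      rw [hf]
      simp only [List.map_cons, List.sum_cons, List.length_cons]
      omega
    · have hf : List.filter (fun p => decide (0 < p.2)) (x :: t)
          = List.filter (fun p => decide (0 < p.2)) t := by simp [h]
      rw [hf]
      exact ih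

theorem pv_roundsR_measure (ks : List (Int × Int))
    (h : ks.filter (fun p => decide (0 < p.2)) ≠ []) :
    ((((ks.filter (fun p => decide (0 < p.2))).map (fun p => (p.1, p.2 - 1))).map
        (fun p => p.2.toNat)).sum) < (ks.map (fun p => p.2.toNat)).sum := by
  have h1 : (((ks.filter (fun p => decide (0 < p.2))).map (fun p => (p.1, p.2 - 1))).map
        (fun p => p.2.toNat)) = (ks.filter (fun p => decide (0 < p.2))).map (fun p => (p.2 - 1).toNat) := by
    simp [List.map_map, Function.comp]
  have h2 := pv_sum_dec ks
  have h3 := pv_sum_filter_le (fun p => decide (0 < p.2)) (fun p => p.2.toNat) ks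
  have h4 : 0 < (ks.filter (fun p => decide (0 < p.2))).length :=
    List.length_pos_of_ne_nil h
  rw [h1]; omega

-- technical: the attach-form of the recursive argument Lean builds for roundsR below
theorem pv_attach_eq (ks : List (Int × Int)) :
    List.map (fun x : {p // p ∈ ks} => ((x : Int × Int).1, (x : Int × Int).2 - 1))
      (List.filter (fun x : {p // p ∈ ks} => decide (0 < (x : Int × Int).2)) ks.attach)
    = List.map (fun p => (p.1, p.2 - 1)) (List.filter (fun p => decide (0 < p.2)) ks) := by
  conv_rhs => rw [← List.unattach_attach (l := ks)]
  rw [List.filter_unattach, List.map_unattach]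
  simp [wfParam]
  rfl

-- the common abstraction: per round, keep the positive-count groups and emit one key from each
def roundsR (ks : List (Int × Int)) : List Int :=
  if ks.filter (fun p => decide (0 < p.2)) = [] then []
  else (ks.filter (fun p => decide (0 < p.2))).map (fun p => p.1) ++
    roundsR ((ks.filter (fun p => decide (0 < p.2))).map (fun p => (p.1, p.2 - 1)))
termination_by (ks.map (fun p => p.2.toNat)).sum
decreasing_by
  rename_i h
  rw [List.unattach_filter (g := fun p => decide (0 < p.2)) (hf := fun x h => rfl),
    List.unattach_attach] at h
  rw [pv_attach_eq]
  exact pv_roundsR_measure ks h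

-- ---- general facts about PySem's stable sort ----

theorem pv_insertBy_map {α β : Type} (f : α → β) (p : β → β → Bool) (x : α) :
    ∀ ys : List α, PySem.List.insertBy p (f x) (ys.map f)
      = (PySem.List.insertBy (fun a b => p (f a) (f b)) x ys).map f := by
  intro ys; induction ys with
  | nil => simp [PySem.List.insertBy]
  | cons y t ih =>
    simp only [List.map_cons, PySem.List.insertBy]
    by_cases h : p (f x) (f y) <;> simp [h, ih]

theorem pv_sorted_map {α β κ : Type} [LinearOrder κ] (f : α → β) (key : β → κ) (l : List α) :
    PySem.List.sorted (l.map f) key true = (PySem.List.sorted l (fun a => key (f a)) true).map f := by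
  rw [PySem.List.sorted_rev_eq_foldl_insertBy, PySem.List.sorted_rev_eq_foldl_insertBy]
  suffices h : ∀ (l : List α) (acc : List α),
      (l.map f).foldl (fun acc x => PySem.List.insertBy (fun a b => decide (key b < key a)) x acc) (acc.map f)
      = (l.foldl (fun acc x => PySem.List.insertBy (fun a b => decide (key (f b) < key (f a))) x acc) acc).map f by
    simpa using h l []
  intro l; induction l with
  | nil => simp
  | cons x t ih =>
    intro acc
    simp only [List.map_cons, List.foldl_cons]
    rw [pv_insertBy_map f _ x acc, ih]

theorem pv_insertBy_congr {α : Type} (p q : α → α → Bool) (x : α) :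
    ∀ ys : List α, (∀ y ∈ ys, p x y = q x y) →
      PySem.List.insertBy p x ys = PySem.List.insertBy q x ys := by
  intro ys; induction ys with
  | nil => simp [PySem.List.insertBy]
  | cons y t ih =>
    intro h
    simp only [PySem.List.insertBy]
    rw [h y (by simp)]
    by_cases hq : q x y <;> simp [hq]
    exact ih (fun z hz => h z (by simp [hz]))

theorem pv_sorted_congr {α κ : Type} [LinearOrder κ] (l : List α) (k1 k2 : α → κ)
    (h : ∀ x ∈ l, k1 x = k2 x) :
    PySem.List.sorted l k1 true = PySem.List.sorted l k2 true := by
  rw [PySem.List.sorted_rev_eq_foldl_insertBy, PySem.List.sorted_rev_eq_foldl_insertBy]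
  suffices hgen : ∀ (l' acc : List α), (∀ x ∈ l', k1 x = k2 x) → (∀ x ∈ acc, k1 x = k2 x) →
      l'.foldl (fun acc x => PySem.List.insertBy (fun a b => decide (k1 b < k1 a)) x acc) acc
      = l'.foldl (fun acc x => PySem.List.insertBy (fun a b => decide (k2 b < k2 a)) x acc) acc by
    exact hgen l [] h (by simp)
  intro l'; induction l' with
  | nil => simp
  | cons x t ih =>
    intro acc hl hacc
    simp only [List.foldl_cons]
    have hx : k1 x = k2 x := hl x (by simp)
    have hins : PySem.List.insertBy (fun a b => decide (k1 b < k1 a)) x acc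
        = PySem.List.insertBy (fun a b => decide (k2 b < k2 a)) x acc := by
      apply pv_insertBy_congr
      intro y hy
      rw [hx, hacc y hy]
    rw [hins]
    refine ih _ (fun z hz => hl z (by simp [hz])) ?_
    intro z hz
    rcases (PySem.List.mem_insertBy _ _ _ _).mp hz with h1 | h2
    · rw [h1]; exact hx
    · exact hacc z h2

-- ---- facts about A's helpers on constant groups ----

theorem pv_pyRange_nil (b : Int) (h : b ≤ 0) : PySem.List.pyRange 0 b 1 = [] := by
  simp [PySem.List.pyRange]
  omega

theorem pv_popAppend_replicate (n : Nat) (k : Int) :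
    popAppendA (List.replicate n k) = List.replicate n k := by
  cases n with
  | zero => rfl
  | succ m =>
    rw [List.replicate_succ]
    show List.replicate m k ++ [k] = _
    rw [← List.replicate_succ', ← List.replicate_succ]

-- ---- facts about B's inner loop ----

theorem pv_emit_filter (gs : List (Int × Int)) (r : Int)
    (h : gs.Pairwise (fun a b => b.2 ≤ a.2)) :
    emitRoundB gs r = (gs.filter (fun p => decide (r < p.2))).map (fun p => p.1) := by
  induction gs with
  | nil => simp [emitRoundB]
  | cons g t ih =>
    obtain ⟨k, c⟩ := g
    rw [List.pairwise_cons] at h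
    by_cases hc : c ≤ r
    · have hf : List.filter (fun p => decide (r < p.2)) ((k, c) :: t) = [] := by
        rw [List.filter_eq_nil_iff]
        intro p hp
        simp only [decide_eq_true_eq]
        rw [List.mem_cons] at hp
        rcases hp with rfl | hp
        · omega
        · have := h.1 p hp; omega
      simp [emitRoundB, hc, hf]
    · have hf : List.filter (fun p => decide (r < p.2)) ((k, c) :: t)
          = (k, c) :: List.filter (fun p => decide (r < p.2)) t := by
        simp [show r < c by omega]
      simp [emitRoundB, hc, hf, ih h.2]

theorem pv_emit_dec (gs : List (Int × Int)) (r : Int) :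
    emitRoundB (gs.map (fun p => (p.1, p.2 - 1))) r = emitRoundB gs (r + 1) := by
  induction gs with
  | nil => simp [emitRoundB]
  | cons g t ih =>
    obtain ⟨k, c⟩ := g
    simp only [List.map_cons, emitRoundB]
    by_cases hc : c ≤ r + 1
    · simp [show c - 1 ≤ r by omega, hc]
    · simp [show ¬(c - 1 ≤ r) by omega, hc, ih]

theorem pv_pyRange_shift (b : Int) :
    PySem.List.pyRange 1 b 1 = (PySem.List.pyRange 0 (b - 1) 1).map (· + 1) := by
  simp only [PySem.List.pyRange]
  norm_num
  intro a _
  omega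

-- ---- the round-robin recursion: unfolding and both directions ----

def maxcOf (gs : List (Int × Int)) : Int := match gs with | [] => 0 | g :: _ => g.2

theorem pv_roundsR_unfold (ks : List (Int × Int)) :
    roundsR ks = (ks.filter (fun p => decide (0 < p.2))).map (fun p => p.1)
      ++ roundsR ((ks.filter (fun p => decide (0 < p.2))).map (fun p => (p.1, p.2 - 1))) := by
  by_cases h : ks.filter (fun p => decide (0 < p.2)) = []
  · rw [roundsR, if_pos h, h]
    rw [roundsR]
    simp
  · rw [roundsR, if_neg h]

theorem pv_sum_perm (ks ks' : List (Int × Int)) (h : ks.Perm ks') :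
    (ks.map (fun p => p.2.toNat)).sum = (ks'.map (fun p => p.2.toNat)).sum :=
  (h.map _).sum_eq

theorem pv_desc_dec (F : List (Int × Int)) (h : F.Pairwise (fun a b => b.2 ≤ a.2)) :
    (F.map (fun p => (p.1, p.2 - 1))).Pairwise (fun a b => b.2 ≤ a.2) :=
  h.map _ (fun a b hab => by simpa using by omega)

theorem pv_roundsB_empty (gs : List (Int × Int))
    (hF : gs.filter (fun p => decide (0 < p.2)) = []) :
    (PySem.List.pyRange 0 (maxcOf gs) 1).flatMap
      (fun r => emitRoundB gs r) = roundsR gs := by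
  rw [roundsR, if_pos hF]
  cases gs with
  | nil =>
    rw [show maxcOf [] = 0 from rfl, pv_pyRange_nil 0 (by omega)]
    simp
  | cons g t =>
    have hg : ¬ 0 < g.2 := by
      intro hpos
      have hmem : g ∈ (g :: t).filter (fun p => decide (0 < p.2)) :=
        List.mem_filter.mpr ⟨List.mem_cons_self, by simpa⟩
      rw [hF] at hmem
      simp at hmem
    show (PySem.List.pyRange 0 g.2 1).flatMap _ = ([] : List Int)
    rw [pv_pyRange_nil g.2 (by omega)]
    simp

theorem pv_roundsB (n : Nat) : ∀ gs : List (Int × Int),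
    (gs.map (fun p => p.2.toNat)).sum ≤ n →
    gs.Pairwise (fun a b => b.2 ≤ a.2) →
    (PySem.List.pyRange 0 (maxcOf gs) 1).flatMap
      (fun r => emitRoundB gs r) = roundsR gs := by
  induction n with
  | zero =>
    intro gs hsum _
    apply pv_roundsB_empty
    rw [List.filter_eq_nil_iff]
    intro p hp
    simp only [decide_eq_true_eq]
    have h0 : p.2.toNat = 0 := by
      have hz : (gs.map (fun p => p.2.toNat)).sum = 0 := Nat.le_zero.mp hsum
      have hmem : p.2.toNat ∈ gs.map (fun p => p.2.toNat) := List.mem_map_of_mem hp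
      exact List.sum_eq_zero_iff.mp hz _ hmem
    omega
  | succ m ih =>
    intro gs hsum hdesc
    by_cases hF : gs.filter (fun p => decide (0 < p.2)) = []
    · exact pv_roundsB_empty gs hF
    · cases gs with
      | nil => simp at hF
      | cons g t =>
        have hhead : 0 < g.2 := by
          by_contra hng
          apply hF
          rw [List.filter_eq_nil_iff]
          intro p hp
          simp only [decide_eq_true_eq]
          rw [List.mem_cons] at hp
          rcases hp with rfl | hp
          · omega
          · have := (List.pairwise_cons.mp hdesc).1 p hp; omega
        have hFc : (g :: t).filter (fun p => decide (0 < p.2))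
            = g :: t.filter (fun p => decide (0 < p.2)) := by simp [hhead]
        show (PySem.List.pyRange 0 g.2 1).flatMap (fun r => emitRoundB (g :: t) r) = roundsR (g :: t)
        rw [PySem.List.pyRange_one_cons (by omega : (0:Int) < g.2)]
        rw [List.flatMap_cons]
        rw [show (0:Int) + 1 = 1 from rfl, pv_pyRange_shift g.2, List.flatMap_map]
        have hcong : ∀ r ∈ PySem.List.pyRange 0 (g.2 - 1) 1,
            emitRoundB (g :: t) (r + 1)
            = emitRoundB (((g :: t).filter (fun p => decide (0 < p.2))).map (fun p => (p.1, p.2 - 1))) r := by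
          intro r hr
          have hr0 : 0 ≤ r := ((PySem.List.mem_pyRange_one).mp hr).1
          rw [pv_emit_dec]
          rw [pv_emit_filter (g :: t) (r + 1) hdesc,
            pv_emit_filter _ (r + 1) (hdesc.filter _)]
          congr 1
          rw [List.filter_filter]
          apply List.filter_congr
          intro p hp
          have : (r + 1 < p.2) ↔ (0 < p.2 ∧ r + 1 < p.2) := by omega
          by_cases hc : r + 1 < p.2
          · simp [hc, show 0 < p.2 by omega]
          · simp [hc]
        have hmeas : ((((g :: t).filter (fun p => decide (0 < p.2))).map
            (fun p => (p.1, p.2 - 1))).map (fun p => p.2.toNat)).sum ≤ m := by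
          have hlt := pv_roundsR_measure (g :: t) hF
          have : ((g :: t).map (fun p => p.2.toNat)).sum ≤ m + 1 := hsum
          omega
        have hdesc' := pv_desc_dec _ (hdesc.filter (fun p => decide (0 < p.2)))
        have hIH := ih _ hmeas hdesc'
        rw [hFc] at hIH
        simp only [List.map_cons, maxcOf] at hIH
        rw [List.flatMap_congr hcong]
        rw [pv_emit_filter (g :: t) 0 hdesc]
        rw [hFc]
        simp only [List.map_cons] at hIH ⊢
        rw [hIH]
        rw [pv_roundsR_unfold (g :: t), hFc]
        simp only [List.map_cons]

theorem pv_loopA_eq (n : Nat) : ∀ (ks : List (Int × Int)) (acc : List Int),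
    (ks.map (fun p => p.2.toNat)).sum + ks.length ≤ n →
    loopA (ks.map (fun p => List.replicate p.2.toNat p.1)) acc
      = acc ++ roundsR (PySem.List.sorted ks (fun p => (p.2.toNat : Int)) true) := by
  induction n with
  | zero =>
    intro ks acc h
    have hnil : ks = [] := by
      cases ks with
      | nil => rfl
      | cons a b => simp at h
    subst hnil
    rw [loopA]
    simp [roundsR, PySem.List.sorted]
  | succ m ih =>
    intro ks acc hm
    cases ks with
    | nil =>
      rw [loopA]
      simp [roundsR, PySem.List.sorted]
    | cons k0 kt =>
      have hmapne : (k0 :: kt).map (fun p => List.replicate p.2.toNat p.1) ≠ [] := by simp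
      rw [loopA, if_neg hmapne]
      have hsortmap : PySem.List.sorted ((k0 :: kt).map (fun p => List.replicate p.2.toNat p.1))
            (fun g => (g.length : Int)) true
          = (PySem.List.sorted (k0 :: kt) (fun p => (p.2.toNat : Int)) true).map
            (fun p => List.replicate p.2.toNat p.1) := by
        rw [pv_sorted_map]
        rw [show (fun a : Int × Int => ((List.replicate a.2.toNat a.1).length : Int))
            = (fun p : Int × Int => (p.2.toNat : Int)) from by funext a; simp]
      have hsksne : PySem.List.sorted (k0 :: kt) (fun p => (p.2.toNat : Int)) true ≠ [] := by
        rw [Ne, PySem.List.sorted_eq_nil_iff]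
        simp
      obtain ⟨s0, st, hsc⟩ : ∃ s0 st,
          PySem.List.sorted (k0 :: kt) (fun p => (p.2.toNat : Int)) true = s0 :: st := by
        cases h : PySem.List.sorted (k0 :: kt) (fun p => (p.2.toNat : Int)) true with
        | nil => exact absurd h hsksne
        | cons a b => exact ⟨a, b, rfl⟩
      rw [hsortmap, hsc]
      simp only [List.map_cons, List.headD_cons]
      -- the pop-and-append rewriting never changes a constant group
      rw [pv_popAppend_replicate]
      have hsort2 : PySem.List.sorted
            (List.replicate s0.2.toNat s0.1 :: List.map (fun p => List.replicate p.2.toNat p.1) st)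
            (fun g => (g.length : Int)) true
          = List.replicate s0.2.toNat s0.1 :: List.map (fun p => List.replicate p.2.toNat p.1) st := by
        have hfold : List.replicate s0.2.toNat s0.1 :: List.map (fun p => List.replicate p.2.toNat p.1) st
            = List.map (fun p => List.replicate p.2.toNat p.1) (s0 :: st) := by simp
        rw [hfold]
        rw [pv_sorted_map]
        rw [show (fun a : Int × Int => ((List.replicate a.2.toNat a.1).length : Int))
            = (fun p : Int × Int => (p.2.toNat : Int)) from by funext a; simp]
        rw [← hsc, PySem.List.sorted_rev_sorted_rev, hsc]
      rw [hsort2, ite_self]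
      rw [show List.replicate s0.2.toNat s0.1 :: List.map (fun p => List.replicate p.2.toNat p.1) st
          = List.map (fun p => List.replicate p.2.toNat p.1) (s0 :: st) from by simp]
      -- the nonempty-group filter is the positive-count filter
      rw [List.filter_map]
      rw [List.filter_congr (q := fun p => decide (0 < p.2))
        (by intro p _
            by_cases h : 0 < p.2 <;>
              [skip; skip] <;>
              simp [Function.comp_apply, List.isEmpty_replicate, h] <;> omega)]
      -- popping the head of each kept group emits its key and decrements its count
      rw [List.map_map, List.map_map]
      rw [List.map_congr_left (g := fun p : Int × Int => p.1)
        (by intro p hp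
            rw [List.mem_filter] at hp
            have hpos : 0 < p.2 := by simpa using hp.2
            have : p.2.toNat ≠ 0 := by omega
            simp only [Function.comp_apply]
            cases hnn : p.2.toNat with
            | zero => exact absurd hnn this
            | succ mm => simp [List.replicate_succ])]
      rw [show (List.tail ∘ fun p : Int × Int => List.replicate p.2.toNat p.1)
          = (fun p : Int × Int => List.replicate p.2.toNat p.1) ∘ (fun p : Int × Int => (p.1, p.2 - 1)) from by
        funext p
        simp only [Function.comp_apply, List.tail_replicate]
        congr 1
        omega]
      rw [← List.map_map]
      -- induction hypothesis on the decremented groups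
      have hperm : ((s0 :: st).map (fun p => p.2.toNat)).sum = ((k0 :: kt).map (fun p => p.2.toNat)).sum := by
        apply pv_sum_perm
        rw [← hsc]
        exact PySem.List.sorted_perm _ _ true
      have hmeas : ((((s0 :: st).filter (fun p => decide (0 < p.2))).map (fun p => (p.1, p.2 - 1))).map
            (fun p => p.2.toNat)).sum
          + (((s0 :: st).filter (fun p => decide (0 < p.2))).map (fun p => (p.1, p.2 - 1))).length ≤ m := by
        have h1 := pv_sum_dec (s0 :: st)
        have h2 := pv_sum_filter_le (fun p => decide (0 < p.2)) (fun p => p.2.toNat) (s0 :: st)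
        have h3 : ((((s0 :: st).filter (fun p => decide (0 < p.2))).map (fun p => (p.1, p.2 - 1))).map
            (fun p => p.2.toNat)) = ((s0 :: st).filter (fun p => decide (0 < p.2))).map (fun p => (p.2 - 1).toNat) := by
          simp [List.map_map, Function.comp]
        rw [h3, List.length_map]
        have hlen : (k0 :: kt).length = kt.length + 1 := by simp
        omega
      rw [ih _ _ hmeas]
      -- the decremented groups are still sorted, so the next round's sort is the identity
      have hdesc : ((s0 :: st)).Pairwise (fun a b => (b.2.toNat : Int) ≤ (a.2.toNat : Int)) := by
        rw [← hsc]
        exact PySem.List.sorted_pairwise_rev _ _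
      have hsorted_id : PySem.List.sorted
            (((s0 :: st).filter (fun p => decide (0 < p.2))).map (fun p => (p.1, p.2 - 1)))
            (fun p => (p.2.toNat : Int)) true
          = ((s0 :: st).filter (fun p => decide (0 < p.2))).map (fun p => (p.1, p.2 - 1)) := by
        apply PySem.List.sorted_rev_eq_self_of_pairwise
        refine (hdesc.filter _).map _ ?_
        intro a b hab
        simp only
        omega
      rw [hsorted_id]
      rw [pv_roundsR_unfold (s0 :: st)]
      simp [List.append_assoc]

theorem altB_eq (lst : List Int) :
    rearrange_list_alt lst
      = roundsR (PySem.List.sorted (PySem.Dict.counter lst).items (fun kv => kv.2) true) := by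
  rw [rearrange_list_alt]
  rw [PySem.List.foldl_append_eq_flatMap]
  rw [show (match PySem.List.sorted (PySem.Dict.counter lst).items (fun kv => kv.2) true with
      | [] => (0 : Int) | g :: _ => g.2)
      = maxcOf (PySem.List.sorted (PySem.Dict.counter lst).items (fun kv => kv.2) true) from rfl]
  rw [pv_roundsB ((PySem.List.sorted (PySem.Dict.counter lst).items (fun kv => kv.2) true).map
      (fun p => p.2.toNat)).sum _ le_rfl (PySem.List.sorted_pairwise_rev _ _)]
  simp

-- ===== VERDICT (by name: the statement is the Claim_ definition above) =====
theorem rearrange_list_spec : Claim_equal_rearrange_list := by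
  intro lst _
  rw [Spec_rearrange_list, rearrange_list]
  simp only [PySem.List.pyRepeat_singleton]
  rw [pv_loopA_eq (((PySem.Dict.counter lst).items.map (fun p => p.2.toNat)).sum
      + (PySem.Dict.counter lst).items.length) _ _ le_rfl]
  rw [pv_sorted_congr _ _ (fun kv => kv.2) ?hkeys]
  · rw [altB_eq]
    simp
  case hkeys =>
    intro p hp
    rw [PySem.Dict.items_counter] at hp
    obtain ⟨k, _, rfl⟩ := List.mem_map.mp hp
    simp
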